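-- pv_equiv track=rewrite | github.com/robinradx/zotero-headless | src/zotero_headless/agent_setup.py | _remove_codex_server_block
-- ===== SOURCE A (Python) =====
-- SERVER_NAME = "zotero-headless"
--
-- def _remove_codex_server_block(text: str) -> str:
--     lines = text.splitlines()
--     kept: list[str] = []
--     skipping = False
--     prefix = f"[mcp_servers.{SERVER_NAME}"
--     for line in lines:
--         stripped = line.strip()
--         if stripped.startswith("[") and stripped.endswith("]"):
--             if stripped.startswith(prefix):
--                 skipping = True
--                 continue
--             if skipping:
--                 skipping = False
--         if not skipping:
--             kept.append(line)
--     result = "\n".join(kept).strip()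
--     return result + ("\n" if result else "")
-- ===== SOURCE B (Python) =====
-- SERVER_NAME = "zotero-headless"
--
-- def _remove_codex_server_block(text: str) -> str:
--     """Block-segmentation rewrite: split lines into header-delimited blocks,
--     drop blocks whose header names the server, flatten the rest."""
--     prefix = f"[mcp_servers.{SERVER_NAME}"
--     lines = text.splitlines()
--
--     def is_header(line: str) -> bool:
--         s = line.strip()
--         return s.startswith("[") and s.endswith("]")
--
--     n = len(lines)
--     # preamble: everything before the first header is always kept
--     i = 0
--     while i < n and not is_header(lines[i]):
--         i += 1
--     kept = lines[:i]
--     # walk the blocks: lines[i] is a header; the block runs to the next header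
--     while i < n:
--         j = i + 1
--         while j < n and not is_header(lines[j]):
--             j += 1
--         if not lines[i].strip().startswith(prefix):
--             kept.extend(lines[i:j])
--         i = j
--     result = "\n".join(kept).strip()
--     return result + ("\n" if result else "")
-- ===== Notes on version B (the rewrite author's own statement) =====
-- stated objective: alternative
-- what changed: Replaces A's single pass with a carried boolean skip flag by a block-segmentation pass: find the preamble, then walk header-delimited blocks and drop whole blocks whose header names the server; no skip state is threaded through the loop.
import Mathlib
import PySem

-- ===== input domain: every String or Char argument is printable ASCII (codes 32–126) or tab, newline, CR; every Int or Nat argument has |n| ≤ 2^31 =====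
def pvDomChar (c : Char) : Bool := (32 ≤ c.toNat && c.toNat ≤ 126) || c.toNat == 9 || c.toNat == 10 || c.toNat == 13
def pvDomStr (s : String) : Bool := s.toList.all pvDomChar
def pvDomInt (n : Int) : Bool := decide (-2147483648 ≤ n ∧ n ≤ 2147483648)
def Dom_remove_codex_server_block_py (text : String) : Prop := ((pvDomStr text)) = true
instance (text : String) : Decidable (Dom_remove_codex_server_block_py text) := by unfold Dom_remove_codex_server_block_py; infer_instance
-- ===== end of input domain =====

-- B replaces A's skipping-flag pass by block segmentation (preamble + header-delimited blocks); alternative decomposition, same cost.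

-- ===== PORT A =====
-- loop body of A's for-loop: state is (kept, skipping)
def pvStepA (st : List String × Bool) (line : String) : List String × Bool :=
  let kept := st.1
  let skipping := st.2
  let stripped := PySem.Str.strip line
  if PySem.Str.startswith stripped "[" && PySem.Str.endswith stripped "]" then
    if PySem.Str.startswith stripped "[mcp_servers.zotero-headless" then (kept, true)
    else (kept ++ [line], false)
  else if skipping then (kept, skipping)
  else (kept ++ [line], skipping)

def remove_codex_server_block_py (text : String) : String :=
  let lines := PySem.Str.splitlines text
  let st := lines.foldl pvStepA ([], false)
  let result := PySem.Str.strip (PySem.Str.join "\n" st.1)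
  result ++ (if result = "" then "" else "\n")

-- ===== PORT B =====
def pvIsHeader (line : String) : Bool :=
  let s := PySem.Str.strip line
  PySem.Str.startswith s "[" && PySem.Str.endswith s "]"

-- B's outer while loop: lines starts at a header; take its block, keep or drop it whole
def pvPickBlocks : List String → List String
  | [] => []
  | l :: ls =>
    let body := ls.takeWhile (fun x => !pvIsHeader x)
    let rest := ls.dropWhile (fun x => !pvIsHeader x)
    (if PySem.Str.startswith (PySem.Str.strip l) "[mcp_servers.zotero-headless" then []
     else l :: body) ++ pvPickBlocks rest
termination_by lines => lines.length
decreasing_by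
  simp only [List.length_cons]
  exact Nat.lt_succ_of_le (List.length_dropWhile_le _ _)

def remove_codex_server_block_py_alt (text : String) : String :=
  let lines := PySem.Str.splitlines text
  let kept := lines.takeWhile (fun x => !pvIsHeader x)
              ++ pvPickBlocks (lines.dropWhile (fun x => !pvIsHeader x))
  let result := PySem.Str.strip (PySem.Str.join "\n" kept)
  result ++ (if result = "" then "" else "\n")

-- ===== PRECONDITION & SPEC =====
def Spec_remove_codex_server_block_py (text : String) (out : String) : Prop := out = remove_codex_server_block_py_alt text
instance (text : String) (out : String) : Decidable (Spec_remove_codex_server_block_py text out) := by unfold Spec_remove_codex_server_block_py; infer_instance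

-- ===== CLAIM (what is proved, stated in full; the proofs are below) =====
def Claim_equal_remove_codex_server_block_py : Prop := ∀ (text : String), Dom_remove_codex_server_block_py text → Spec_remove_codex_server_block_py text (remove_codex_server_block_py text)

-- ===== LEMMAS AND PROOFS =====
-- unfolding lemma for the well-founded recursion
theorem pvPickBlocks_cons (l : String) (ls : List String) :
    pvPickBlocks (l :: ls)
      = (if PySem.Str.startswith (PySem.Str.strip l) "[mcp_servers.zotero-headless" then []
         else l :: ls.takeWhile (fun x => !pvIsHeader x))
        ++ pvPickBlocks (ls.dropWhile (fun x => !pvIsHeader x)) := by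
  rw [pvPickBlocks.eq_def]

-- A's flagged pass equals B's segmentation, stated for both start values of the flag.
theorem pvLoop_eq (ls : List String) : ∀ kept : List String,
    (ls.foldl pvStepA (kept, false)).1
      = kept ++ ls.takeWhile (fun x => !pvIsHeader x)
             ++ pvPickBlocks (ls.dropWhile (fun x => !pvIsHeader x))
  ∧ (ls.foldl pvStepA (kept, true)).1
      = kept ++ pvPickBlocks (ls.dropWhile (fun x => !pvIsHeader x)) := by
  induction ls with
  | nil => intro kept; simp [pvPickBlocks]
  | cons l ls ih =>
    intro kept
    by_cases h : pvIsHeader l = true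
    · have hs : (PySem.Str.startswith (PySem.Str.strip l) "[" &&
          PySem.Str.endswith (PySem.Str.strip l) "]") = true := h
      by_cases hm : PySem.Str.startswith (PySem.Str.strip l) "[mcp_servers.zotero-headless" = true
      · constructor <;>
        · simp only [List.foldl_cons, pvStepA, hs, hm, if_true,
            List.takeWhile_cons, List.dropWhile_cons, h, Bool.not_true, Bool.false_eq_true,
            if_false, pvPickBlocks_cons, List.nil_append, List.append_nil]
          exact (ih kept).2
      · have hm' : PySem.Str.startswith (PySem.Str.strip l) "[mcp_servers.zotero-headless" = false :=
          Bool.not_eq_true _ ▸ eq_false_of_ne_true hm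
        constructor <;>
        · simp only [List.foldl_cons, pvStepA, hs, hm', if_true, Bool.false_eq_true, if_false,
            List.takeWhile_cons, List.dropWhile_cons, h, Bool.not_true, pvPickBlocks_cons]
          rw [(ih (kept ++ [l])).1]
          simp [List.append_assoc]
    · have hs : (PySem.Str.startswith (PySem.Str.strip l) "[" &&
          PySem.Str.endswith (PySem.Str.strip l) "]") = false := by
        simpa [pvIsHeader] using h
      have h' : pvIsHeader l = false := by simpa using h
      constructor
      · simp only [List.foldl_cons, pvStepA, hs, Bool.false_eq_true, if_false,
          List.takeWhile_cons, List.dropWhile_cons, h', Bool.not_false, if_true]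
        rw [(ih (kept ++ [l])).1]
        simp [List.append_assoc]
      · simp only [List.foldl_cons, pvStepA, hs, Bool.false_eq_true, if_false, if_true,
          List.dropWhile_cons, h', Bool.not_false]
        exact (ih kept).2

-- ===== VERDICT (by name: the statement is the Claim_ definition above) =====
theorem remove_codex_server_block_py_spec : Claim_equal_remove_codex_server_block_py := by
  intro text _
  have h := (pvLoop_eq (PySem.Str.splitlines text) []).1
  simp only [List.nil_append] at h
  exact congrArg (fun ks =>
    (fun result => result ++ if result = "" then "" else "\n")
      (PySem.Str.strip (PySem.Str.join "\n" ks))) h
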